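-- pv_equiv track=rewrite | github.com/whatgit/AdventOfCode | 2022/day5/day5.py | get_top_row
-- ===== SOURCE A (Python) =====
-- def get_top_row(array):
--     text = ""
--     for ncol in range(0, len(array[0])):
--         for nrow in range(0, len(array)):
--             if array[nrow][ncol] != '':
--                 text = text + array[nrow][ncol]
--                 break
--     return text
-- ===== SOURCE B (Python) =====
-- def get_top_row(array):
--     res = [''] * len(array[0])
--     for row in array:
--         res = [cur if cur != '' else row[c] for c, cur in enumerate(res)]
--     return ''.join(res)
-- ===== Notes on version B (the rewrite author's own statement) =====
-- stated objective: alternative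
-- what changed: A scans column-major with an inner row loop and break per column; B makes one row-major pass that rebuilds a per-column result list (keeping the first non-empty cell seen for each column) and joins it at the end.
import Mathlib
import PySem

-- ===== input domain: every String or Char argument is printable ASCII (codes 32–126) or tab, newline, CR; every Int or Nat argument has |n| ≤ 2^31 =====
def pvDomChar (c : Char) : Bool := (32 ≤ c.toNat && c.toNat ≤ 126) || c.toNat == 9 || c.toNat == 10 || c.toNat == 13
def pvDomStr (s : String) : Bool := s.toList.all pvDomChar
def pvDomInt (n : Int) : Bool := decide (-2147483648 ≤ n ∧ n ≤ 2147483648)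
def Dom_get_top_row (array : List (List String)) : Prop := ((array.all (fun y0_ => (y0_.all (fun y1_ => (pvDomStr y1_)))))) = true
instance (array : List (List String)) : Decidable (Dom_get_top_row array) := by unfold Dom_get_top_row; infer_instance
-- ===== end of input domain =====

-- B replaces A's column-major scan (inner row loop with break) by one row-major pass that
-- rebuilds a per-column list keeping the first non-empty cell per column, then joins it
-- (objective: alternative decomposition, same cost).

-- ===== PORT A =====
-- inner loop 'for nrow in range(0, len(array)): if array[nrow][ncol] != "": …; break' —
-- indices 0..len(array)-1 reading array[nrow] is the structural scan of the rows list;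
-- 'break' returns some cell, falling off the loop returns none.  Out-of-range cell access
-- (IndexError in Python) is defaulted to "" by pyGetD; Pre_ excludes those inputs.
def aScan (ncol : Int) : List (List String) → Option String
  | [] => none
  | row :: rest =>
      if PySem.List.pyGetD row ncol "" ≠ "" then some (PySem.List.pyGetD row ncol "")
      else aScan ncol rest

def get_top_row (array : List (List String)) : String :=
  (PySem.List.pyRange 0 ((PySem.List.pyGetD array 0 []).length : Int) 1).foldl
    (fun text ncol =>
      match aScan ncol array with
      | some cell => text ++ cell
      | none => text) ""

-- ===== PORT B =====
-- res = [cur if cur != '' else row[c] for c, cur in enumerate(res)]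
def bStep (row res : List String) : List String :=
  (PySem.List.enumerate res).map
    (fun p => if p.2 ≠ "" then p.2 else PySem.List.pyGetD row p.1 "")

def get_top_row_alt (array : List (List String)) : String :=
  PySem.Str.join ""
    (array.foldl (fun res row => bStep row res)
      (List.replicate (PySem.List.pyGetD array 0 []).length ""))

-- ===== PRECONDITION & SPEC =====
-- Python A raises IndexError on an empty outer list (at array[0]) and on ragged inputs where some column scan
-- reaches a row shorter than the column index before any earlier row supplied a non-empty
-- cell there; Pre_ excludes exactly those raising inputs.
def Pre_get_top_row (array : List (List String)) : Prop :=
  array ≠ [] ∧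
  ∀ c < (array.getD 0 []).length, ∀ r < array.length,
    (∀ r' < r, c < (array.getD r' []).length ∧ (array.getD r' []).getD c "" = "") →
    c < (array.getD r []).length
instance (array : List (List String)) : Decidable (Pre_get_top_row array) := by
  unfold Pre_get_top_row; infer_instance

def pvWitness_get_top_row : List (List String) := [["", "a"], ["b", ""]]

def Spec_get_top_row (array : List (List String)) (out : String) : Prop := out = get_top_row_alt array
instance (array : List (List String)) (out : String) : Decidable (Spec_get_top_row array out) := by unfold Spec_get_top_row; infer_instance

-- ===== CLAIM (what is proved, stated in full; the proofs are below) =====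
def Claim_equal_get_top_row : Prop := ∀ (array : List (List String)), Dom_get_top_row array → Pre_get_top_row array → Spec_get_top_row array (get_top_row array)

-- ===== LEMMAS AND PROOFS =====

-- the first non-empty cell of column c (both programs compute this per column)
def colVal : List (List String) → Nat → String
  | [], _ => ""
  | row :: rest, c => if row.getD c "" ≠ "" then row.getD c "" else colVal rest c

theorem strJoin_cons (a : String) (l : List String) :
    PySem.Str.join "" (a :: l) = a ++ PySem.Str.join "" l := by
  apply String.toList_inj.mp
  simp [PySem.Str.join]
  cases l <;> simp [PySem.Chars.join_cons_cons]

theorem aScan_step (array : List (List String)) (c : Nat) (t : String) :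
    (match aScan (c : Int) array with
      | some cell => t ++ cell
      | none => t) = t ++ colVal array c := by
  induction array with
  | nil => simp [aScan, colVal]
  | cons row rest ih =>
      simp only [aScan, colVal, PySem.List.pyGetD_natCast]
      split_ifs with h
      · rfl
      · exact ih

theorem A_fold (array : List (List String)) (L : List Nat) (t : String) :
    (L.map (Nat.cast : Nat → Int)).foldl
      (fun text ncol =>
        match aScan ncol array with
        | some cell => text ++ cell
        | none => text) t
    = t ++ PySem.Str.join "" (L.map (colVal array)) := by
  induction L generalizing t with
  | nil =>
      have h : PySem.Str.join "" ([] : List String) = "" := rfl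
      simp [h]
  | cons c L ih =>
      rw [List.map_cons, List.foldl_cons, List.map_cons, strJoin_cons]
      have hs := aScan_step array c t
      simp only at hs
      rw [hs, ih, String.append_assoc]

theorem length_bStep (row res : List String) : (bStep row res).length = res.length := by
  simp [bStep, PySem.List.length_enumerate]

theorem getElem_bStep (row res : List String) (c : Nat) (h : c < res.length)
    (h' : c < (bStep row res).length) :
    (bStep row res)[c] = if res[c] ≠ "" then res[c] else row.getD c "" := by
  simp [bStep, PySem.List.getElem_enumerate]

theorem length_fold (array : List (List String)) (res : List String) :
    (array.foldl (fun r row => bStep row r) res).length = res.length := by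
  induction array generalizing res with
  | nil => rfl
  | cons row rest ih => simp only [List.foldl_cons]; rw [ih, length_bStep]

theorem getElem_fold (array : List (List String)) (res : List String) (c : Nat)
    (h : c < res.length) (h' : c < (array.foldl (fun r row => bStep row r) res).length) :
    (array.foldl (fun r row => bStep row r) res)[c]
      = if res[c] ≠ "" then res[c] else colVal array c := by
  induction array generalizing res with
  | nil => simp [colVal]
  | cons row rest ih =>
      simp only [List.foldl_cons] at h' ⊢
      rw [ih (bStep row res) (by rw [length_bStep]; exact h) h']
      rw [getElem_bStep row res c h (by rw [length_bStep]; exact h)]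
      by_cases hc : res[c] = ""
      · simp [hc, colVal]
      · simp [hc]

theorem B_list (array : List (List String)) (n : Nat) :
    array.foldl (fun r row => bStep row r) (List.replicate n "")
      = (List.range n).map (colVal array) := by
  apply List.ext_getElem
  · rw [length_fold]; simp
  · intro c h1 h2
    have hc : c < n := by rw [length_fold] at h1; simpa using h1
    rw [getElem_fold array (List.replicate n "") c (by simpa using hc) h1]
    simp

-- ===== VERDICT (by name: the statement is the Claim_ definition above) =====
theorem get_top_row_spec : Claim_equal_get_top_row := by
  intro array _ _
  unfold Spec_get_top_row get_top_row get_top_row_alt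
  rw [B_list, PySem.List.pyRange_zero_nat, A_fold, String.empty_append]
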